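-- pv_equiv track=rewrite | github.com/oriolsastre/adventofcode | 2024/22.py | best_buy_n_secret_number
-- ===== SOURCE A (Python) =====
-- import operator
--
-- def mix_value(value:int, secret_number:int)->int:
--     return operator.xor(value, secret_number)
--
-- def prune_secret_number(secret_number:int)->int:
--     return secret_number%16777216
--
-- def next_secret_number(secret_number:int)->int:
--     # First step
--     first_step=secret_number*64
--     first_mix = mix_value(first_step, secret_number)
--     first_prune = prune_secret_number(first_mix)
--     # Second step
--     second_step = first_prune//32
--     second_mix = mix_value(second_step, first_prune)
--     second_prune = prune_secret_number(second_mix)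
--     # Third step
--     third_step = second_prune*2048
--     third_mix = mix_value(third_step, second_prune)
--     third_prune = prune_secret_number(third_mix)
--
--     return third_prune
--
-- def best_buy_n_secret_number(secret_number:int, n:int)->dict:
--     millors_preus={}
--     preu=secret_number%10
--     preu_prev=None
--     dpreu=None
--     d_preus=[]
--     for i in range(n):
--         if i > 0: dpreu=preu-preu_prev
--         d_preus.append(dpreu)
--         if len(d_preus)>4: d_preus.pop(0)
--         if tuple(d_preus) not in millors_preus: millors_preus[tuple(d_preus)]=preu
--         preu_prev=preu
--         secret_number=next_secret_number(secret_number)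
--         preu=secret_number%10
--     return millors_preus
-- ===== SOURCE B (Python) =====
-- import operator
--
-- def mix_value(value:int, secret_number:int)->int:
--     return operator.xor(value, secret_number)
--
-- def prune_secret_number(secret_number:int)->int:
--     return secret_number%16777216
--
-- def next_secret_number(secret_number:int)->int:
--     first_prune = prune_secret_number(mix_value(secret_number*64, secret_number))
--     second_prune = prune_secret_number(mix_value(first_prune//32, first_prune))
--     return prune_secret_number(mix_value(second_prune*2048, second_prune))
--
-- def best_buy_n_secret_number(secret_number:int, n:int)->dict:
--     # Pass 1: generate all prices.
--     prices = []
--     s = secret_number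
--     for _ in range(n):
--         prices.append(s % 10)
--         s = next_secret_number(s)
--     # Pass 2: deltas (deltas[0] = None, the first price has no predecessor).
--     deltas = [None] + [prices[i] - prices[i-1] for i in range(1, len(prices))]
--     # Pass 3: first price seen for each window of up to the last 4 deltas.
--     best = {}
--     for i in range(len(prices)):
--         key = tuple(deltas[max(0, i-3):i+1])
--         if key not in best:
--             best[key] = prices[i]
--     return best
-- ===== Notes on version B (the rewrite author's own statement) =====
-- stated objective: alternative
-- what changed: Replaces A's single pass with a mutable sliding-window deque and interleaved state updates by three separate passes: generate all prices, build a deltas list, then key each index by a slice deltas[max(0,i-3):i+1] with first-occurrence-wins.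
import Mathlib
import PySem

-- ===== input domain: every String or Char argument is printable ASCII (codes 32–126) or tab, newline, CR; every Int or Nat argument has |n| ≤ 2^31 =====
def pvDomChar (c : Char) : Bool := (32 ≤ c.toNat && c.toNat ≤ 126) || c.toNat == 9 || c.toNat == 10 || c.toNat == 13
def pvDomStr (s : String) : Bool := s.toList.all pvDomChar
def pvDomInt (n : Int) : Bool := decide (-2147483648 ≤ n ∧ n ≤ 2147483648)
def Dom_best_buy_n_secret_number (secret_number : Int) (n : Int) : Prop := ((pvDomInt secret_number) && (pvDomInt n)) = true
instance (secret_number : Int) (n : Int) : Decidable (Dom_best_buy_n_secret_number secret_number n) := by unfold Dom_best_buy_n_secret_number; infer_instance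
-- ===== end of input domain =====

-- B replaces A's single interleaved pass (mutable sliding-window deque) by three separate
-- passes — prices list, deltas list, then slice-keyed first-occurrence dict; alternative, not faster.


-- ===== PORT A =====
-- shared module helpers (identical in Source A and Source B)
def mix_value (value : Int) (secret_number : Int) : Int := PySem.Int.bxor value secret_number

def prune_secret_number (secret_number : Int) : Int := PySem.Int.mod secret_number 16777216

def next_secret_number (secret_number : Int) : Int :=
  let first_step := secret_number * 64
  let first_mix := mix_value first_step secret_number
  let first_prune := prune_secret_number first_mix
  let second_step := PySem.Int.floordiv first_prune 32
  let second_mix := mix_value second_step first_prune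
  let second_prune := prune_secret_number second_mix
  let third_step := second_prune * 2048
  let third_mix := mix_value third_step second_prune
  let third_prune := prune_secret_number third_mix
  third_prune

-- one iteration of A's loop body, on the state
-- (millors_preus, preu, preu_prev, dpreu, d_preus, secret_number);
-- preu_prev is Option Int (None initially); '.getD 0' is only reached under the i > 0
-- guard, where Python's preu_prev is an int.
def pvAStep (st : PySem.Dict (List (Option Int)) Int × Int × Option Int × Option Int × List (Option Int) × Int)
    (i : Int) : PySem.Dict (List (Option Int)) Int × Int × Option Int × Option Int × List (Option Int) × Int :=
  let (millors, preu, preu_prev, dpreu, d_preus, secret) := st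
  let dpreu := if i > 0 then some (preu - preu_prev.getD 0) else dpreu
  let d_preus := d_preus ++ [dpreu]
  let d_preus := if d_preus.length > 4 then d_preus.drop 1 else d_preus   -- d_preus.pop(0)
  let millors := if millors.contains d_preus = false then millors.insert d_preus preu else millors
  let secret := next_secret_number secret
  (millors, PySem.Int.mod secret 10, some preu, dpreu, d_preus, secret)

def best_buy_n_secret_number (secret_number : Int) (n : Int) : List (List (Option Int) × Int) :=
  (((PySem.List.pyRange 0 n 1).foldl pvAStep
      (PySem.Dict.empty, PySem.Int.mod secret_number 10, none, none, [], secret_number)).1).items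

-- ===== PORT B =====
-- pass 1 of Source B: the list of all n prices
def pvPrices (secret_number : Int) (n : Int) : List Int :=
  ((PySem.List.pyRange 0 n 1).foldl
      (fun (st : List Int × Int) _ => (st.1 ++ [PySem.Int.mod st.2 10], next_secret_number st.2))
      ([], secret_number)).1

-- pass 2 of Source B: the deltas list ('prices[i]' has an in-range index, so pyGetD with default 0 is exact)
def pvDeltas (secret_number : Int) (n : Int) : List (Option Int) :=
  none :: (PySem.List.pyRange 1 ((pvPrices secret_number n).length : Int) 1).map
    (fun i => some (PySem.List.pyGetD (pvPrices secret_number n) i 0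
      - PySem.List.pyGetD (pvPrices secret_number n) (i - 1) 0))

-- pass 3 of Source B: first price per window key
def best_buy_n_secret_number_alt (secret_number : Int) (n : Int) : List (List (Option Int) × Int) :=
  ((PySem.List.pyRange 0 ((pvPrices secret_number n).length : Int) 1).foldl
    (fun (d : PySem.Dict (List (Option Int)) Int) i =>
      let key := PySem.List.slice (pvDeltas secret_number n) (some (max 0 (i - 3))) (some (i + 1))
      if d.contains key = false then d.insert key (PySem.List.pyGetD (pvPrices secret_number n) i 0) else d)
    PySem.Dict.empty).items

-- ===== PRECONDITION & SPEC =====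
def Spec_best_buy_n_secret_number (secret_number : Int) (n : Int) (out : List (List (Option Int) × Int)) : Prop := out = best_buy_n_secret_number_alt secret_number n
instance (secret_number : Int) (n : Int) (out : List (List (Option Int) × Int)) : Decidable (Spec_best_buy_n_secret_number secret_number n out) := by unfold Spec_best_buy_n_secret_number; infer_instance

-- ===== CLAIM (what is proved, stated in full; the proofs are below) =====
def Claim_equal_best_buy_n_secret_number : Prop := ∀ (secret_number : Int) (n : Int), Dom_best_buy_n_secret_number secret_number n → Spec_best_buy_n_secret_number secret_number n (best_buy_n_secret_number secret_number n)

-- ===== LEMMAS AND PROOFS =====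

-- the secret after k iterations, its price, and the k-th delta / window of B's lists
def pvSec (s0 : Int) : Nat → Int
  | 0 => s0
  | k+1 => next_secret_number (pvSec s0 k)

def pvPrice (s0 : Int) (k : Nat) : Int := PySem.Int.mod (pvSec s0 k) 10

def pvDelta (s0 : Int) (k : Nat) : Option Int :=
  if k = 0 then none else some (pvPrice s0 k - pvPrice s0 (k-1))

def pvD (s0 : Int) (m : Nat) : List (Option Int) := (List.range m).map (pvDelta s0)

def pvW (s0 : Int) (m k : Nat) : List (Option Int) :=
  ((pvD s0 m).drop (k - 3)).take (k + 1 - (k - 3))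

def pvBStep (s0 : Int) (m : Nat) (d : PySem.Dict (List (Option Int)) Int) (k : Nat) :
    PySem.Dict (List (Option Int)) Int :=
  if d.contains (pvW s0 m k) = false then d.insert (pvW s0 m k) (pvPrice s0 k) else d

def pvDictB (s0 : Int) (m k : Nat) : PySem.Dict (List (Option Int)) Int :=
  (List.range k).foldl (pvBStep s0 m) PySem.Dict.empty

def pvStA (s0 : Int) (k : Nat) :=
  (List.range k).foldl (fun st (j : Nat) => pvAStep st (j : Int))
    ((PySem.Dict.empty : PySem.Dict (List (Option Int)) Int), PySem.Int.mod s0 10,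
      (none : Option Int), (none : Option Int), ([] : List (Option Int)), s0)

lemma pvSec_shift (s0 : Int) (k : Nat) :
    pvSec s0 (k+1) = pvSec (next_secret_number s0) k := by
  induction k with
  | zero => rfl
  | succ k ih =>
      show next_secret_number (pvSec s0 (k+1)) = next_secret_number (pvSec (next_secret_number s0) k)
      rw [ih]

lemma pvPrice_shift (s0 : Int) (k : Nat) :
    pvPrice s0 (k+1) = pvPrice (next_secret_number s0) k := by
  simp [pvPrice, pvSec_shift]

lemma pvPrices_fold (l : List Int) (acc : List Int) (s : Int) :
    (l.foldl (fun (st : List Int × Int) _ =>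
        (st.1 ++ [PySem.Int.mod st.2 10], next_secret_number st.2)) (acc, s)).1
      = acc ++ (List.range l.length).map (pvPrice s) := by
  induction l generalizing acc s with
  | nil => simp
  | cons x l ih =>
      show (l.foldl _ (acc ++ [PySem.Int.mod s 10], next_secret_number s)).1 = _
      rw [ih, List.length_cons, List.range_succ_eq_map, List.map_cons, List.map_map,
        List.append_cons]
      have hmap : List.map (pvPrice s ∘ Nat.succ) (List.range l.length)
          = List.map (pvPrice (next_secret_number s)) (List.range l.length) :=
        List.map_congr_left (fun a _ => by
          show pvPrice s (a+1) = _
          rw [pvPrice_shift])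
      rw [hmap]
      simp [pvPrice, pvSec]

lemma pvPrices_eq (s0 : Int) (n : Int) :
    pvPrices s0 n = (List.range n.toNat).map (pvPrice s0) := by
  unfold pvPrices
  rw [pvPrices_fold]
  simp [PySem.List.length_pyRange_one]

lemma pvD_length (s0 : Int) (m : Nat) : (pvD s0 m).length = m := by simp [pvD]

lemma pvD_getElem (s0 : Int) (m k : Nat) (h : k < m) :
    (pvD s0 m)[k]'(by simpa [pvD_length] using h) = pvDelta s0 k := by
  simp [pvD]

lemma pvW_zero (s0 : Int) (m : Nat) (hm : 1 ≤ m) : pvW s0 m 0 = [none] := by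
  unfold pvW
  have h0 : (0:Nat) < (pvD s0 m).length := by rw [pvD_length]; omega
  simp only [Nat.zero_sub, List.drop_zero]
  rw [show (0 + 1 - 0 : Nat) = 0 + 1 from rfl, List.take_succ_eq_append_getElem h0]
  simp [pvD_getElem s0 m 0 (by omega), pvDelta]

lemma pvW_step (s0 : Int) (m k : Nat) (hk : 1 ≤ k) (hkm : k < m) :
    (if (pvW s0 m (k-1) ++ [pvDelta s0 k]).length > 4
      then (pvW s0 m (k-1) ++ [pvDelta s0 k]).drop 1
      else pvW s0 m (k-1) ++ [pvDelta s0 k]) = pvW s0 m k := by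
  have hlen : (pvD s0 m).length = m := pvD_length s0 m
  have happ : pvW s0 m (k-1) ++ [pvDelta s0 k]
      = ((pvD s0 m).drop (k-4)).take (k+1-(k-4)) := by
    unfold pvW
    have h1 : k - 1 - 3 = k - 4 := by omega
    have h2 : k - 1 + 1 - (k - 4) = k - (k-4) := by omega
    rw [h1, h2]
    have hj : k - (k-4) < ((pvD s0 m).drop (k-4)).length := by
      rw [List.length_drop, hlen]; omega
    rw [show k+1-(k-4) = (k-(k-4)) + 1 from by omega,
        List.take_succ_eq_append_getElem hj]
    congr 2
    rw [List.getElem_drop]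
    exact pvD_getElem s0 m k (by omega) ▸ by congr 1; omega
  rw [happ]
  have hlen2 : (((pvD s0 m).drop (k-4)).take (k+1-(k-4))).length = k+1-(k-4) := by
    rw [List.length_take, List.length_drop, hlen]; omega
  by_cases h4 : 4 ≤ k
  · rw [if_pos (by rw [hlen2]; omega)]
    rw [List.drop_take, List.drop_drop, show k - 4 + 1 = k - 3 from by omega]
    unfold pvW
    rw [show k + 1 - (k - 4) - 1 = k + 1 - (k - 3) from by omega]
  · rw [if_neg (by rw [hlen2]; omega)]
    unfold pvW
    rw [show k - 4 = k - 3 from by omega]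

lemma pvStA_eq (s0 : Int) (m : Nat) : ∀ k, 1 ≤ k → k ≤ m →
    pvStA s0 k = (pvDictB s0 m k, pvPrice s0 k, some (pvPrice s0 (k-1)),
      pvDelta s0 (k-1), pvW s0 m (k-1), pvSec s0 k) := by
  intro k
  induction k with
  | zero => omega
  | succ k ih =>
      intro _ hkm
      have hstep : pvStA s0 (k+1) = pvAStep (pvStA s0 k) (k : Int) := by
        unfold pvStA
        rw [List.range_succ, List.foldl_append, List.foldl_cons, List.foldl_nil]
      by_cases hk : k = 0
      · subst hk
        rw [hstep]
        show pvAStep _ (0:Int) = _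
        unfold pvStA pvAStep
        simp only [List.range_zero, List.foldl_nil]
        have hW0 : pvW s0 m 0 = [none] := pvW_zero s0 m (by omega)
        simp [pvDictB, pvBStep, hW0, pvDelta, pvPrice, pvSec,
          PySem.Dict.contains_empty]
      · have hk1 : 1 ≤ k := by omega
        rw [hstep, ih hk1 (by omega)]
        unfold pvAStep
        have hpos : ((k:Int) > 0) := by exact_mod_cast Nat.pos_of_ne_zero hk
        simp only [if_pos hpos, Option.getD_some]
        have hd : some (pvPrice s0 k - pvPrice s0 (k-1)) = pvDelta s0 k := by
          simp [pvDelta, hk]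
        rw [hd, pvW_step s0 m k hk1 (by omega)]
        have hdict : (if (pvDictB s0 m k).contains (pvW s0 m k) = false
            then (pvDictB s0 m k).insert (pvW s0 m k) (pvPrice s0 k)
            else pvDictB s0 m k) = pvDictB s0 m (k+1) := by
          unfold pvDictB
          rw [List.range_succ, List.foldl_append, List.foldl_cons, List.foldl_nil]
          rfl
        rw [hdict]
        simp [pvPrice, pvSec]

lemma pvDeltas_eq (s0 : Int) (n : Int) (hm : 1 ≤ n.toNat) :
    pvDeltas s0 n = pvD s0 n.toNat := by
  obtain ⟨m', hm'⟩ : ∃ m', n.toNat = m' + 1 := ⟨n.toNat - 1, by omega⟩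
  unfold pvDeltas
  rw [pvPrices_eq, hm']
  rw [PySem.List.pyRange_one, List.map_map]
  rw [show ((((List.range (m'+1)).map (pvPrice s0)).length : Int) - 1).toNat = m' from by simp]
  conv_rhs => rw [pvD, List.range_succ_eq_map, List.map_cons, List.map_map]
  congr 1
  apply List.map_congr_left
  intro a ha
  have ham : a < m' := List.mem_range.mp ha
  simp only [Function.comp]
  have e1 : (1:Int) + (a:Int) = ((a+1 : Nat) : Int) := by push_cast; ring
  have e2 : ((a+1 : Nat) : Int) - 1 = ((a : Nat) : Int) := by push_cast; ring
  rw [e1, PySem.List.pyGetD_natCast, e2, PySem.List.pyGetD_natCast]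
  rw [PySem.List.getD_map_range _ _ _ _ (by omega), PySem.List.getD_map_range _ _ _ _ (by omega)]
  show _ = pvDelta s0 (a+1)
  simp [pvDelta]

-- ===== VERDICT (by name: the statement is the Claim_ definition above) =====
theorem best_buy_n_secret_number_spec : Claim_equal_best_buy_n_secret_number := by
  intro s0 n _
  unfold Spec_best_buy_n_secret_number
  by_cases hn : n ≤ 0
  · have hr : PySem.List.pyRange 0 n 1 = [] := PySem.List.pyRange_one_eq_nil hn
    have h0 : (((pvPrices s0 n).length : Nat) : Int) = (0 : Int) := by
      simp [pvPrices_eq, Int.toNat_of_nonpos hn]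
    unfold best_buy_n_secret_number best_buy_n_secret_number_alt
    rw [hr, h0, PySem.List.pyRange_one_eq_nil (le_refl (0:Int))]
    rfl
  · have hn' : 0 < n := by omega
    set m := n.toNat with hmdef
    have hm1 : 1 ≤ m := by omega
    -- A's side
    have hA : best_buy_n_secret_number s0 n = (pvStA s0 m).1.items := by
      unfold best_buy_n_secret_number pvStA
      rw [PySem.List.pyRange_one]
      simp only [Int.sub_zero, zero_add, ← hmdef]
      rw [List.foldl_map]
    -- B's side
    have hprices : pvPrices s0 n = (List.range m).map (pvPrice s0) := pvPrices_eq s0 n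
    have hdeltas : pvDeltas s0 n = pvD s0 m := pvDeltas_eq s0 n hm1
    have hB : best_buy_n_secret_number_alt s0 n = (pvDictB s0 m m).items := by
      unfold best_buy_n_secret_number_alt
      rw [hdeltas, hprices]
      rw [show (((List.range m).map (pvPrice s0)).length : Int) = (m : Int) from by simp]
      rw [PySem.List.pyRange_one]
      simp only [Int.sub_zero, zero_add, Int.toNat_natCast]
      rw [List.foldl_map]
      unfold pvDictB
      congr 1
      apply PySem.List.foldl_congr_mem
      intro d j hj
      have hjm : j < m := List.mem_range.mp hj
      show (if d.contains (PySem.List.slice (pvD s0 m) (some (max 0 ((j:Int) - 3))) (some ((j:Int) + 1))) = false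
          then d.insert (PySem.List.slice (pvD s0 m) (some (max 0 ((j:Int) - 3))) (some ((j:Int) + 1)))
            (PySem.List.pyGetD ((List.range m).map (pvPrice s0)) (j:Int) 0)
          else d) = pvBStep s0 m d j
      have e1 : max 0 ((j:Int) - 3) = ((j - 3 : Nat) : Int) := by omega
      have e2 : (j:Int) + 1 = ((j + 1 : Nat) : Int) := by push_cast; ring
      rw [e1, e2, PySem.List.slice_natCast]
      rw [PySem.List.pyGetD_natCast, PySem.List.getD_map_range _ _ _ _ hjm]
      rfl
    rw [hA, hB, pvStA_eq s0 m m hm1 (le_refl m)]
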